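-- pv_equiv track=rewrite | github.com/Narwhalssss/CompTech_Assignment_3 | parsers.py | _tokenize_production
-- ===== SOURCE A (Python) =====
-- from typing import Dict, List, Set, Tuple, Optional
--
-- def _tokenize_production(production: str) -> List[str]:
--     tokens = []
--     current_token = ""
--
--     for char in production:
--         if char.isspace():
--             if current_token:
--                 tokens.append(current_token)
--                 current_token = ""
--         else:
--             if len(current_token) == 1 or (current_token and current_token[-1].isupper() != char.isupper()):
--                 if current_token:
--                     tokens.append(current_token)
--                 current_token = char
--             else:
--                 current_token += char
--
--     if current_token:
--         tokens.append(current_token)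
--
--     return tokens
-- ===== SOURCE B (Python) =====
-- from typing import List
--
-- def _tokenize_production(production: str) -> List[str]:
--     # A's accumulator can never hold more than one character (the len==1 test
--     # forces a flush on every subsequent non-space char), so every non-whitespace
--     # character is its own token.
--     return [c for c in production if not c.isspace()]
-- ===== Notes on version B (the rewrite author's own statement) =====
-- stated objective: simpler
-- what changed: Replaced the stateful loop with an accumulator, whitespace-flush and case-transition branches by a one-line filter: since A's accumulator can never exceed one character, B just emits each non-whitespace character as its own token.
import Mathlib
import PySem

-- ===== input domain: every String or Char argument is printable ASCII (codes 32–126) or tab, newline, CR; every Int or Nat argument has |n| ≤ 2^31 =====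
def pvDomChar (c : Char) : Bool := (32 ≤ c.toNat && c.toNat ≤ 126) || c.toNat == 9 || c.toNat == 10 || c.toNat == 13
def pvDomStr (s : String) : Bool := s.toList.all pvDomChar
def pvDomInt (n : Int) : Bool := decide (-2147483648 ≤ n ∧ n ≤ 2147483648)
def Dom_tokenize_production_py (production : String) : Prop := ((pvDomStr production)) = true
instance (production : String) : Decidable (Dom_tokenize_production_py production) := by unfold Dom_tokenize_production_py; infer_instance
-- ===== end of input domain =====

-- B replaces A's stateful accumulator + case-transition branches by a plain filter
-- (A's accumulator never exceeds one character, so each non-space char is its own token): simpler.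


-- ===== PORT A =====
-- one iteration of A's for-loop; state = (tokens, current_token as List Char)
def tokStepA (st : List String × List Char) (char : Char) : List String × List Char :=
  let tokens := st.1
  let cur := st.2
  if PySem.Chars.isspace char then
    if cur ≠ [] then (tokens ++ [String.ofList cur], []) else (tokens, cur)
  else
    if cur.length == 1 ||
       (decide (cur ≠ []) && ((PySem.List.pyGet? cur (-1)).any PySem.Chars.isupper != PySem.Chars.isupper char)) then
      ((if cur ≠ [] then tokens ++ [String.ofList cur] else tokens), [char])
    else
      (tokens, cur ++ [char])

def tokenize_production_py (production : String) : List String :=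
  let st := production.toList.foldl tokStepA ([], [])
  if st.2 ≠ [] then st.1 ++ [String.ofList st.2] else st.1

-- ===== PORT B =====
def tokenize_production_py_alt (production : String) : List String :=
  (production.toList.filter (fun c => !PySem.Chars.isspace c)).map (fun c => String.ofList [c])

-- ===== PRECONDITION & SPEC =====
def Spec_tokenize_production_py (production : String) (out : List String) : Prop := out = tokenize_production_py_alt production
instance (production : String) (out : List String) : Decidable (Spec_tokenize_production_py production out) := by unfold Spec_tokenize_production_py; infer_instance

-- ===== CLAIM (what is proved, stated in full; the proofs are below) =====
def Claim_equal_tokenize_production_py : Prop := ∀ (production : String), Dom_tokenize_production_py production → Spec_tokenize_production_py production (tokenize_production_py production)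

-- ===== LEMMAS AND PROOFS =====
-- A's flush at loop end
def finA (st : List String × List Char) : List String :=
  if st.2 ≠ [] then st.1 ++ [String.ofList st.2] else st.1

theorem stepA_sp0 (tokens : List String) (c : Char) (h : PySem.Chars.isspace c = true) :
    tokStepA (tokens, []) c = (tokens, []) := by simp [tokStepA, h]

theorem stepA_sp1 (tokens : List String) (d c : Char) (h : PySem.Chars.isspace c = true) :
    tokStepA (tokens, [d]) c = (tokens ++ [String.ofList [d]], []) := by simp [tokStepA, h]

theorem stepA_ns0 (tokens : List String) (c : Char) (h : PySem.Chars.isspace c = false) :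
    tokStepA (tokens, []) c = (tokens, [c]) := by simp [tokStepA, h]

theorem stepA_ns1 (tokens : List String) (d c : Char) (h : PySem.Chars.isspace c = false) :
    tokStepA (tokens, [d]) c = (tokens ++ [String.ofList [d]], [c]) := by simp [tokStepA, h]

-- invariant: the accumulator is empty or a single non-space character;
-- the finished fold equals the flushed state followed by one singleton token per non-space char
theorem tokStepA_run (l : List Char) : ∀ (tokens : List String) (cur : List Char),
    (cur = [] ∨ ∃ c, cur = [c] ∧ PySem.Chars.isspace c = false) →
    finA (l.foldl tokStepA (tokens, cur)) =
      finA (tokens, cur) ++ (l.filter (fun c => !PySem.Chars.isspace c)).map (fun c => String.ofList [c]) := by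
  induction l with
  | nil => intro tokens cur _; simp
  | cons c l ih =>
    intro tokens cur hcur
    by_cases hs : PySem.Chars.isspace c = true
    · rcases hcur with h | ⟨d, hd, _⟩
      · subst h
        rw [List.foldl_cons, stepA_sp0 _ _ hs, ih _ [] (Or.inl rfl)]
        simp [finA, hs]
      · subst hd
        rw [List.foldl_cons, stepA_sp1 _ _ _ hs, ih _ [] (Or.inl rfl)]
        simp [finA, hs]
    · replace hs : PySem.Chars.isspace c = false := by simpa using hs
      rcases hcur with h | ⟨d, hd, hdns⟩
      · subst h
        rw [List.foldl_cons, stepA_ns0 _ _ hs, ih _ [c] (Or.inr ⟨c, rfl, hs⟩)]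
        simp [finA, hs]
      · subst hd
        rw [List.foldl_cons, stepA_ns1 _ _ _ hs, ih _ [c] (Or.inr ⟨c, rfl, hs⟩)]
        simp [finA, hs]

-- ===== VERDICT (by name: the statement is the Claim_ definition above) =====
theorem tokenize_production_py_spec : Claim_equal_tokenize_production_py := by
  intro production _
  show tokenize_production_py production = tokenize_production_py_alt production
  have h := tokStepA_run production.toList [] [] (Or.inl rfl)
  simp [finA] at h
  simpa [tokenize_production_py, tokenize_production_py_alt, finA] using h
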